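-- pv_equiv track=rewrite | github.com/zsq0216/swe-factory | inference/build_image/transfer_agent.py | _omit_diff_body
-- ===== SOURCE A (Python) =====
-- def _omit_diff_body(diff_output: str) -> str:
--     """Replace diff hunks with a placeholder to keep feedback short."""
--     lines: list[str] = []
--     in_hunk = False
--     for line in diff_output.splitlines():
--         if line.startswith("@@"):
--             if not in_hunk:
--                 lines.append("[HUNK CONTENT OMITTED]")
--                 in_hunk = True
--             continue
--         if line.startswith("diff --git "):
--             in_hunk = False
--             lines.append(line)
--         elif not in_hunk:
--             lines.append(line)
--     return "\n".join(lines)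
-- ===== SOURCE B (Python) =====
-- def _omit_diff_body(diff_output: str) -> str:
--     """Replace diff hunks with a placeholder to keep feedback short.
--
--     Group lines into per-file blocks (each block starts at a 'diff --git '
--     header line; lines before the first header form a preamble block), then
--     for each block keep the lines before its first '@@' line, plus one
--     placeholder if the block has any '@@' line.
--     """
--     blocks = []
--     cur = []
--     for line in diff_output.splitlines():
--         if line.startswith("diff --git "):
--             blocks.append(cur)
--             cur = [line]
--         else:
--             cur.append(line)
--     blocks.append(cur)
--
--     out = []
--     for block in blocks:
--         for line in block:
--             if line.startswith("@@"):
--                 out.append("[HUNK CONTENT OMITTED]")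
--                 break
--             out.append(line)
--     return "\n".join(out)
-- ===== Notes on version B (the rewrite author's own statement) =====
-- stated objective: alternative
-- what changed: Replaced A's single-pass in_hunk state machine with a group-then-map computation: split the lines into per-file blocks at 'diff --git ' headers, keep each block's lines before its first '@@' plus one placeholder, then concatenate.
import Mathlib
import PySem

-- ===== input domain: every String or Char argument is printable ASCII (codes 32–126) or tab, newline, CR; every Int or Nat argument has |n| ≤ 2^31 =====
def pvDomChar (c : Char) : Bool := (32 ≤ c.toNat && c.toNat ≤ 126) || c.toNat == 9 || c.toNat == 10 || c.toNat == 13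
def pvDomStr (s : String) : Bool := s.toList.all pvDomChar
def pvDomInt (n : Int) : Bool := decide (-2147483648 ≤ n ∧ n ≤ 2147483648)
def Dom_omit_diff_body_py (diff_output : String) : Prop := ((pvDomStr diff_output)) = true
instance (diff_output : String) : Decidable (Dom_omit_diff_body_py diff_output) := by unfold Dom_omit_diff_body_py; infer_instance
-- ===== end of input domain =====

-- B replaces A's in_hunk state machine by a group-then-map computation: split the lines
-- into per-file blocks at 'diff --git ' headers, keep each block's lines before its first
-- '@@' plus one placeholder; objective: alternative decomposition (same cost).

-- ===== PORT A =====
-- the placeholder line and the two startswith tests, as characters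
def pvHunkMsg : List Char := "[HUNK CONTENT OMITTED]".toList
def pvIsAt (l : List Char) : Bool := PySem.Chars.startswith l "@@".toList
def pvIsGit (l : List Char) : Bool := PySem.Chars.startswith l "diff --git ".toList

-- A's loop over splitlines with the in_hunk flag; builds the kept lines front-to-back
def pvA_loop : List (List Char) → Bool → List (List Char)
  | [], _ => []
  | l :: rest, inHunk =>
    if pvIsAt l then
      if !inHunk then pvHunkMsg :: pvA_loop rest true
      else pvA_loop rest inHunk
    else if pvIsGit l then
      l :: pvA_loop rest false
    else if !inHunk then l :: pvA_loop rest inHunk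
    else pvA_loop rest inHunk

def omit_diff_body_py (diff_output : String) : String :=
  String.ofList (PySem.Chars.join "\n".toList
    (pvA_loop (PySem.Chars.splitlines diff_output.toList) false))

-- ===== PORT B =====
-- B's grouping pass: split at 'diff --git ' headers, accumulating the current block
def pvB_split : List (List Char) → List (List Char) → List (List (List Char))
  | [], cur => [cur]
  | l :: rest, cur =>
    if pvIsGit l then
      cur :: pvB_split rest [l]
    else
      pvB_split rest (cur ++ [l])

-- B's inner loop over one block: keep lines up to the first '@@', then the placeholder
def pvB_keep : List (List Char) → List (List Char)
  | [] => []
  | l :: rest =>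
    if pvIsAt l then [pvHunkMsg]
    else l :: pvB_keep rest

def omit_diff_body_py_alt (diff_output : String) : String :=
  String.ofList (PySem.Chars.join "\n".toList
    ((pvB_split (PySem.Chars.splitlines diff_output.toList) []).flatMap pvB_keep))

-- ===== PRECONDITION & SPEC =====
def Spec_omit_diff_body_py (diff_output : String) (out : String) : Prop := out = omit_diff_body_py_alt diff_output
instance (diff_output : String) (out : String) : Decidable (Spec_omit_diff_body_py diff_output out) := by unfold Spec_omit_diff_body_py; infer_instance

-- ===== CLAIM (what is proved, stated in full; the proofs are below) =====
def Claim_equal_omit_diff_body_py : Prop := ∀ (diff_output : String), Dom_omit_diff_body_py diff_output → Spec_omit_diff_body_py diff_output (omit_diff_body_py diff_output)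

-- ===== LEMMAS AND PROOFS =====

theorem pvB_keep_nil : pvB_keep [] = [] := rfl

-- a 'diff --git ' header does not start with '@@'
theorem pv_not_both (l : List Char)
    (h : pvIsGit l = true) :
    pvIsAt l = false := by
  unfold pvIsGit at h
  rw [PySem.Chars.startswith_iff] at h
  unfold pvIsAt
  by_contra hc
  rw [Bool.not_eq_false, PySem.Chars.startswith_iff] at hc
  obtain ⟨t1, h1⟩ := h
  obtain ⟨t2, h2⟩ := hc
  rw [← h1] at h2
  simp at h2

-- the main invariant: if the kept lines of the current block plus any suffix are
-- K ++ (B's keep of the suffix when not in a hunk, nothing when in one), then the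
-- flattened blocks equal K ++ A's loop output
theorem pv_main (ls : List (List Char)) (cur : List (List Char)) (b : Bool)
    (K : List (List Char))
    (hInv : ∀ s, pvB_keep (cur ++ s) = K ++ (if b then [] else pvB_keep s)) :
    (pvB_split ls cur).flatMap pvB_keep = K ++ pvA_loop ls b := by
  induction ls generalizing cur b K with
  | nil =>
    have h := hInv []
    simp [pvB_keep_nil] at h
    simp [pvB_split, pvA_loop]
    cases b <;> simpa using h
  | cons l rest ih =>
    by_cases hAt : pvIsAt l = true
    · have hGit : pvIsGit l = false := by
        by_contra hc
        rw [Bool.not_eq_false] at hc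
        rw [pv_not_both l hc] at hAt; exact Bool.false_ne_true hAt
      have step : pvB_split (l :: rest) cur = pvB_split rest (cur ++ [l]) := by
        simp [pvB_split, hGit]
      rw [step]
      have hInv' : ∀ s, pvB_keep ((cur ++ [l]) ++ s) =
          (K ++ (if b then [] else [pvHunkMsg])) ++ (if true then [] else pvB_keep s) := by
        intro s
        have := hInv (l :: s)
        simp only [List.append_assoc, List.cons_append, List.nil_append] at this ⊢
        rw [this]
        cases b <;> simp [pvB_keep, hAt]
      rw [ih (cur ++ [l]) true _ hInv']
      cases b <;> simp [pvA_loop, hAt]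
    · rw [Bool.not_eq_true] at hAt
      by_cases hGit : pvIsGit l = true
      · have step : pvB_split (l :: rest) cur = cur :: pvB_split rest [l] := by
          simp [pvB_split, hGit]
        rw [step]
        have hInv' : ∀ s, pvB_keep ([l] ++ s) = [l] ++ (if false then [] else pvB_keep s) := by
          intro s; simp [pvB_keep, hAt]
        have hcur : pvB_keep cur = K := by
          have := hInv []
          simpa [pvB_keep_nil] using this
        simp only [List.flatMap_cons]
        rw [ih [l] false [l] hInv', hcur]
        simp [pvA_loop, hAt, hGit]
      · rw [Bool.not_eq_true] at hGit
        have step : pvB_split (l :: rest) cur = pvB_split rest (cur ++ [l]) := by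
          simp [pvB_split, hGit]
        rw [step]
        have hInv' : ∀ s, pvB_keep ((cur ++ [l]) ++ s) =
            (K ++ (if b then [] else [l])) ++ (if b then [] else pvB_keep s) := by
          intro s
          have := hInv (l :: s)
          simp only [List.append_assoc, List.cons_append, List.nil_append] at this ⊢
          rw [this]
          cases b <;> simp [pvB_keep, hAt]
        rw [ih (cur ++ [l]) b _ hInv']
        cases b <;> simp [pvA_loop, hAt, hGit]

-- ===== VERDICT (by name: the statement is the Claim_ definition above) =====
theorem omit_diff_body_py_spec : Claim_equal_omit_diff_body_py := by
  intro s _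
  unfold Spec_omit_diff_body_py omit_diff_body_py omit_diff_body_py_alt
  rw [pv_main (PySem.Chars.splitlines s.toList) [] false []
    (by intro t; simp)]
  simp
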